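-- pv_equiv track=rewrite | github.com/naverhe826-boop/dbsdk | data_builder/combination_builder.py | _cartesian_merge_groups
-- ===== SOURCE A (Python) =====
-- import itertools
-- from typing import Any, Dict, List, Optional, TYPE_CHECKING
--
-- def _cartesian_merge_groups(
--     group_combos: Dict[Optional[str], List[Dict[str, Any]]]
-- ) -> List[Dict[str, Any]]:
--     """跨组笛卡尔积合并"""
--     if not group_combos:
--         return []
--
--     scopes = list(group_combos.keys())
--     combo_lists = [group_combos[s] for s in scopes]
--
--     merged = []
--     for combo_tuple in itertools.product(*combo_lists):
--         # 合并所有组的字段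
--         merged_row = {}
--         for combo in combo_tuple:
--             merged_row.update(combo)
--         merged.append(merged_row)
--     return merged
-- ===== SOURCE B (Python) =====
-- def _cartesian_merge_groups(group_combos):
--     """Cross-group cartesian merge, as an iterative fold over the groups."""
--     if not group_combos:
--         return []
--     result = [{}]
--     for combo_list in group_combos.values():
--         result = [{**acc, **combo} for acc in result for combo in combo_list]
--     return result
-- ===== Notes on version B (the rewrite author's own statement) =====
-- stated objective: alternative
-- what changed: Replaces itertools.product over pre-collected combo lists (then a per-tuple dict-update loop) by an iterative fold that threads the partial product through the groups, merging each group's combos into the accumulated rows one group at a time.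
import Mathlib
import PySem

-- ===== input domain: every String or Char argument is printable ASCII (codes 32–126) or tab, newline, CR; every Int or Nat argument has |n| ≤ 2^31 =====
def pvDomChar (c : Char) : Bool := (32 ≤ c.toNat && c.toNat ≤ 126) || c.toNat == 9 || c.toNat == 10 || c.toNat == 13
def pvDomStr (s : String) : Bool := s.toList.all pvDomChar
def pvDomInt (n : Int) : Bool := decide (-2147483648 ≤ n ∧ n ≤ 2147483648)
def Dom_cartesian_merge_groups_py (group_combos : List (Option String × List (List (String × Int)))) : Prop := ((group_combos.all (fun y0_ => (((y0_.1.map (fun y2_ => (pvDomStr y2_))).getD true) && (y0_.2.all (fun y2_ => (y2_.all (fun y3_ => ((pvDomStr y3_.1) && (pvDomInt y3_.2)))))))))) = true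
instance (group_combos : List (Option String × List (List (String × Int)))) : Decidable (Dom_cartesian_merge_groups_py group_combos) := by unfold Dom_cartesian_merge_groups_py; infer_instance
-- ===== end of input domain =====

-- B replaces itertools.product over the key-indexed combo lists by an iterative fold
-- that threads the partial product through the groups ('alternative' decomposition, same cost).

-- ===== PORT A =====
-- itertools.product over a list of lists (leftmost factor varies slowest)
def pvProduct {α : Type} : List (List α) → List (List α)
  | [] => [[]]
  | l :: ls => l.flatMap (fun x => (pvProduct ls).map (x :: ·))

def cartesian_merge_groups_py (group_combos : List (Option String × List (List (String × Int)))) : List (List (String × Int)) :=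
  if group_combos = [] then []
  else
    let d := PySem.Dict.ofList group_combos
    let scopes := d.keys
    let combo_lists := scopes.map (fun s => d.getD s [])
    (pvProduct combo_lists).map (fun combo_tuple =>
      (combo_tuple.foldl
        (fun merged_row combo =>
          combo.foldl (fun r (kv : String × Int) => r.insert kv.1 kv.2) merged_row)
        PySem.Dict.empty).items)

-- ===== PORT B =====
def cartesian_merge_groups_py_alt (group_combos : List (Option String × List (List (String × Int)))) : List (List (String × Int)) :=
  if group_combos = [] then []
  else
    (((PySem.Dict.ofList group_combos).values).foldl
      (fun result combo_list =>
        result.flatMap (fun acc => combo_list.map (fun combo =>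
          combo.foldl (fun r (kv : String × Int) => r.insert kv.1 kv.2) acc)))
      [PySem.Dict.empty]).map (fun r => r.items)

-- ===== PRECONDITION & SPEC =====
def Spec_cartesian_merge_groups_py (group_combos : List (Option String × List (List (String × Int)))) (out : List (List (String × Int))) : Prop := out = cartesian_merge_groups_py_alt group_combos
instance (group_combos : List (Option String × List (List (String × Int)))) (out : List (List (String × Int))) : Decidable (Spec_cartesian_merge_groups_py group_combos out) := by unfold Spec_cartesian_merge_groups_py; infer_instance

-- ===== CLAIM (what is proved, stated in full; the proofs are below) =====
def Claim_equal_cartesian_merge_groups_py : Prop := ∀ (group_combos : List (Option String × List (List (String × Int)))), Dom_cartesian_merge_groups_py group_combos → Spec_cartesian_merge_groups_py group_combos (cartesian_merge_groups_py group_combos)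

-- ===== LEMMAS AND PROOFS =====

-- B's fold over the group lists equals the flatMap form of A's product-then-merge, for any
-- starting list of partial rows.
theorem pvFold_eq_product {α β : Type} (upd : β → α → β) :
    ∀ (ls : List (List α)) (R : List β),
      ls.foldl (fun result l => result.flatMap (fun acc => l.map (fun c => upd acc c))) R
        = R.flatMap (fun acc => (pvProduct ls).map (fun t => t.foldl upd acc)) := by
  intro ls
  induction ls with
  | nil =>
      intro R
      simp [pvProduct, List.flatMap_singleton']
  | cons l ls ih =>
      intro R
      simp only [List.foldl_cons, ih, pvProduct, List.flatMap_assoc, List.map_flatMap,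
        List.flatMap_map, List.map_map, Function.comp_def, List.foldl_cons]

theorem cartesian_merge_groups_py_spec : Claim_equal_cartesian_merge_groups_py := by
  intro gcs _
  unfold Spec_cartesian_merge_groups_py cartesian_merge_groups_py cartesian_merge_groups_py_alt
  by_cases h : gcs = []
  · simp [h]
  · simp only [h, ite_false]
    rw [pvFold_eq_product]
    rw [PySem.Dict.values_eq_map_keys (PySem.Dict.ofList gcs) (PySem.Dict.nodup_keys_ofList gcs) []]
    simp
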